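-- pv_equiv track=rewrite | github.com/Jeraldheo/Programming | Python/Projects/ATM_Queue/queue_atm.py | getFinalOrder
-- ===== SOURCE A (Python) =====
-- import math
--
-- def getFinalOrder(k, amount):
--     # Write your code here
--     timesQ = dict()
--     n = len(amount)
--     for i in range(n):
--         times = math.ceil(amount[i]/k)
--         if times in timesQ:
--             timesQ[times].append(i+1)
--         else:
--             timesQ[times]=[i+1]
--     keys = list(timesQ.keys())
--     keys.sort()
--     result = []
--     for key in keys:
--         result = result + timesQ[key]
--
--     return result
-- ===== SOURCE B (Python) =====
-- import math
--
-- def getFinalOrder(k, amount):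
--     n = len(amount)
--     return sorted(range(1, n + 1), key=lambda i: (math.ceil(amount[i - 1] / k), i))
-- ===== Notes on version B (the rewrite author's own statement) =====
-- stated objective: simpler
-- what changed: Drops the bucket dict entirely: B sorts the 1-based indices directly by the tuple (ceil(amount[i-1]/k), i) in one comparison sort, instead of grouping indices into a dict keyed by service time, sorting the distinct keys, and concatenating the buckets.
import Mathlib
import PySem

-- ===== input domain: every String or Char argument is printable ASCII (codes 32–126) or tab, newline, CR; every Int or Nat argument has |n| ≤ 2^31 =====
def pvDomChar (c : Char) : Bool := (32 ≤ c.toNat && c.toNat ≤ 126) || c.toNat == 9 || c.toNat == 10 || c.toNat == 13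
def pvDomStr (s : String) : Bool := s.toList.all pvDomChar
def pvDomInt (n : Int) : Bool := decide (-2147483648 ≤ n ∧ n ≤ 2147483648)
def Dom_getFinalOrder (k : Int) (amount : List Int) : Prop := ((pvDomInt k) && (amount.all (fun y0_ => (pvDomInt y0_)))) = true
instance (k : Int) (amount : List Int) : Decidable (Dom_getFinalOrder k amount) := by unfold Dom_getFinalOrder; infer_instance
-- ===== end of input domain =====

-- B drops A's bucket dict and sorts the 1-based indices directly by (service time, index); objective: simpler. Equivalence is about the return value only.

-- math.ceil(a/k) ported as the exact integer ceiling -((-a)//k): exact on Dom, where |a|,|k| ≤ 2^31,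
-- so the float quotient a/k (error ≤ |a/k|·2⁻⁵³ < 1/|k|) never rounds across an integer.
def pvCeilDiv (a k : Int) : Int := -(PySem.Int.floordiv (-a) k)

-- ===== PORT A =====
def getFinalOrder (k : Int) (amount : List Int) : List Int :=
  let n : Int := (amount.length : Int)
  let timesQ : PySem.Dict Int (List Int) :=
    (PySem.List.pyRange 0 n 1).foldl (fun d i =>
      let times := pvCeilDiv (PySem.List.pyGetD amount i 0) k
      if d.contains times then d.insert times (d.getD times [] ++ [i + 1])
      else d.insert times [i + 1]) PySem.Dict.empty
  let keys := PySem.List.sorted timesQ.keys (fun x => x) false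
  keys.foldl (fun result key => result ++ timesQ.getD key []) []

-- ===== PORT B =====
def getFinalOrder_alt (k : Int) (amount : List Int) : List Int :=
  let n : Int := (amount.length : Int)
  PySem.List.sorted2 (PySem.List.pyRange 1 (n + 1) 1)
    (fun i => pvCeilDiv (PySem.List.pyGetD amount (i - 1) 0) k) (fun i => i) false

-- ===== PRECONDITION & SPEC =====
-- Pre_ excludes exactly k = 0 with a nonempty amount, where Python's amount[i]/k raises ZeroDivisionError (in both A and B).
def Pre_getFinalOrder (k : Int) (amount : List Int) : Prop := k ≠ 0 ∨ amount = []
instance (k : Int) (amount : List Int) : Decidable (Pre_getFinalOrder k amount) := by unfold Pre_getFinalOrder; infer_instance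
def pvWitness_getFinalOrder : Int × List Int := (3, [7, 2, 9, 2])
def Spec_getFinalOrder (k : Int) (amount : List Int) (out : List Int) : Prop := out = getFinalOrder_alt k amount
instance (k : Int) (amount : List Int) (out : List Int) : Decidable (Spec_getFinalOrder k amount out) := by unfold Spec_getFinalOrder; infer_instance

-- ===== CLAIM (what is proved, stated in full; the proofs are below) =====
def Claim_equal_getFinalOrder : Prop := ∀ (k : Int) (amount : List Int), Dom_getFinalOrder k amount → Pre_getFinalOrder k amount → Spec_getFinalOrder k amount (getFinalOrder k amount)

-- ===== LEMMAS AND PROOFS =====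

-- A's if/contains/append-else-new step is exactly d[t] = d.get(t, []) + [v].
theorem pv_step_eq (d : PySem.Dict Int (List Int)) (t v : Int) :
    (if d.contains t then d.insert t (d.getD t [] ++ [v]) else d.insert t [v])
      = d.modify t [] (· ++ [v]) := by
  by_cases h : d.contains t
  · simp [h, PySem.Dict.modify]
  · simp only [h, if_neg, Bool.false_eq_true, not_false_iff, PySem.Dict.modify]
    rw [PySem.Dict.getD_of_not_contains d [] (by simpa using h), List.nil_append]

-- the grouping loop: bucket of t holds i+1 for the i (in order) whose key is t
theorem pv_bucket (f : Int → Int) (l : List Int) (t : Int) :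
    ((l.foldl (fun d i => d.modify (f i) [] (· ++ [i + 1])) PySem.Dict.empty).getD t [])
      = (l.filter (fun i => f i == t)).map (fun i => i + 1) := by
  have h : l.foldl (fun d i => d.modify (f i) [] (· ++ [i + 1])) PySem.Dict.empty
      = (l.map (fun i => (f i, i + 1))).foldl (fun d p => d.modify p.1 [] (· ++ [p.2])) PySem.Dict.empty := by
    rw [List.foldl_map]
  rw [h, PySem.Dict.getD_foldl_modify_append, PySem.Dict.getD_empty, List.filter_map,
    List.map_map]
  simp [Function.comp_def]

theorem pv_keys (f : Int → Int) (l : List Int) :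
    ((l.foldl (fun d i => d.modify (f i) [] (· ++ [i + 1])) PySem.Dict.empty).keys)
      = PySem.Set.ofList (l.map f) := by
  rw [PySem.Dict.keys_foldl_modify_key l f [] (fun _ i => (· ++ [i + 1]))]
  simp [PySem.Dict.keys_empty, PySem.Set.update, PySem.Set.ofList_eq_foldl]

-- concatenating, over a nodup list of keys covering all keys, the key-t sublists is a permutation
theorem pv_flatMap_filter_perm (g : Int → Int) (L idxs : List Int)
    (hnd : L.Nodup) (hcov : ∀ i ∈ idxs, g i ∈ L) :
    (L.flatMap (fun t => idxs.filter (fun i => g i == t))).Perm idxs := by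
  induction L generalizing idxs with
  | nil =>
    have : idxs = [] := by
      cases idxs with
      | nil => rfl
      | cons a l => exact absurd (hcov a (List.mem_cons_self)) (List.not_mem_nil)
    simp [this]
  | cons t L ih =>
    rw [List.flatMap_cons]
    have hfix : ∀ t' ∈ L, idxs.filter (fun i => g i == t')
        = (idxs.filter (fun i => !(g i == t))).filter (fun i => g i == t') := by
      intro t' ht'
      rw [List.filter_filter]
      apply List.filter_congr
      intro i _
      by_cases h : g i = t'
      · have : t' ≠ t := fun he => (List.nodup_cons.mp hnd).1 (he ▸ ht')
        simp [h, this]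
      · simp [h]
    have hmapeq : L.flatMap (fun t' => idxs.filter (fun i => g i == t'))
        = L.flatMap (fun t' => (idxs.filter (fun i => !(g i == t))).filter (fun i => g i == t')) := by
      apply List.flatMap_congr
      intro t' ht'
      exact hfix t' ht'
    rw [hmapeq]
    have hperm := ih (idxs.filter (fun i => !(g i == t))) (List.nodup_cons.mp hnd).2
      (by
        intro i hi
        rcases List.mem_filter.mp hi with ⟨hi', hne⟩
        have := hcov i hi'
        rcases List.mem_cons.mp this with h | h
        · simp [h] at hne
        · exact h)
    exact (List.Perm.append_left _ hperm).trans (List.filter_append_perm _ idxs)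

-- pyRange(1, n+1) is pyRange(0, n) shifted by one
theorem pv_range_shift (n : Int) :
    (PySem.List.pyRange 0 n 1).map (fun i => i + 1) = PySem.List.pyRange 1 (n + 1) 1 := by
  simp only [PySem.List.pyRange]
  norm_num
  intro a _
  omega

theorem pv_range_pairwise (a b : Int) :
    (PySem.List.pyRange a b 1).Pairwise (· < ·) := by
  simp only [PySem.List.pyRange]
  split
  · exact List.Pairwise.nil
  · rw [List.pairwise_map]
    exact (List.pairwise_lt_range).imp (by intro x y h; omega)

-- Python's tuple sort key (k1, k2) is the single lexicographic key
theorem pv_sorted2_eq_sorted_lex (xs : List Int) (k1 k2 : Int → Int) :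
    PySem.List.sorted2 xs k1 k2 false
      = PySem.List.sorted xs (fun x => toLex (k1 x, k2 x)) false := by
  simp only [PySem.List.sorted2, PySem.List.sorted]
  congr 1
  funext acc x
  congr 1
  funext p q
  by_cases h1 : k1 p < k1 q <;> by_cases h2 : k1 q < k1 p <;> by_cases h3 : k2 p < k2 q <;>
    simp [h1, h2, h3, Prod.Lex.lt_iff] <;> omega

theorem getFinalOrder_eq (k : Int) (amount : List Int) :
    getFinalOrder k amount = getFinalOrder_alt k amount := by
  set n : Int := (amount.length : Int) with hn
  set f : Int → Int := fun i => pvCeilDiv (PySem.List.pyGetD amount i 0) k with hf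
  set r0 := PySem.List.pyRange 0 n 1 with hr0
  set r1 := PySem.List.pyRange 1 (n + 1) 1 with hr1
  set g : Int → Int := fun j => f (j - 1) with hg
  -- A's result in closed form
  have hstep : (fun (d : PySem.Dict Int (List Int)) (i : Int) =>
      let times := f i
      if d.contains times then d.insert times (d.getD times [] ++ [i + 1])
      else d.insert times [i + 1])
      = fun d i => d.modify (f i) [] (· ++ [i + 1]) := by
    funext d i
    exact pv_step_eq d (f i) (i + 1)
  have hbucket : ∀ t, (r0.foldl (fun d i => d.modify (f i) [] (· ++ [i + 1]))
      PySem.Dict.empty).getD t [] = r1.filter (fun j => g j == t) := by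
    intro t
    rw [pv_bucket]
    have h1 : (r0.filter (fun i => f i == t)).map (fun i => i + 1)
        = (r0.map (fun i => i + 1)).filter (fun j => g j == t) := by
      rw [List.filter_map]
      congr 1
      apply List.filter_congr
      intro i _
      simp [hg]
    rw [h1, hr0, pv_range_shift]
  have hA : getFinalOrder k amount
      = (PySem.List.sorted (PySem.Set.ofList (r0.map f)) (fun x => x) false).flatMap
          (fun t => r1.filter (fun j => g j == t)) := by
    show ((PySem.List.sorted ((r0.foldl (fun d i =>
        let times := f i
        if d.contains times then d.insert times (d.getD times [] ++ [i + 1])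
        else d.insert times [i + 1]) PySem.Dict.empty)).keys (fun x => x) false).foldl
        (fun result key => result ++ (r0.foldl (fun d i =>
        let times := f i
        if d.contains times then d.insert times (d.getD times [] ++ [i + 1])
        else d.insert times [i + 1]) PySem.Dict.empty).getD key []) []) = _
    rw [hstep, pv_keys, PySem.List.foldl_append_eq_flatMap]
    rw [List.nil_append]
    apply List.flatMap_congr
    intro t _
    exact hbucket t
  -- B's result is the lexicographic sort of r1
  have hB : getFinalOrder_alt k amount
      = PySem.List.sorted r1 (fun j => toLex (g j, j)) false := by
    show PySem.List.sorted2 r1 (fun i => pvCeilDiv (PySem.List.pyGetD amount (i - 1) 0) k)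
        (fun i => i) false = _
    rw [pv_sorted2_eq_sorted_lex]
  rw [hA, hB]
  symm
  -- the key list: sorted distinct keys, strictly increasing
  set L := PySem.List.sorted (PySem.Set.ofList (r0.map f)) (fun x => x) false with hL
  have hLlt : L.Pairwise (· < ·) := PySem.List.sorted_ofList_pairwise_lt _
  have hLnd : L.Nodup := hLlt.imp (fun h => ne_of_lt h)
  have hcov : ∀ j ∈ r1, g j ∈ L := by
    intro j hj
    rw [hL, PySem.List.mem_sorted, PySem.Set.mem_ofList, List.mem_map]
    refine ⟨j - 1, ?_, rfl⟩
    rw [hr0, PySem.List.mem_pyRange_one]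
    rw [hr1, PySem.List.mem_pyRange_one] at hj
    omega
  apply PySem.List.sorted_eq_of_perm_of_pairwise_lt
  · exact pv_flatMap_filter_perm g L r1 hLnd hcov
  · rw [List.pairwise_flatMap]
    constructor
    · intro t _
      rw [List.pairwise_filter]
      refine (pv_range_pairwise 1 (n + 1)).imp ?_
      intro a b hab
      · intro hat hbt
        rw [Prod.Lex.lt_iff]
        right
        constructor
        · simp only [ofLex_toLex]
          have h1 : g a = t := by simpa using hat
          have h2 : g b = t := by simpa using hbt
          rw [h1, h2]
        · simpa using hab
    · refine hLlt.imp ?_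
      intro t1 t2 ht x hx y hy
      rw [Prod.Lex.lt_iff]
      left
      have h1 : g x = t1 := by simpa using (List.mem_filter.mp hx).2
      have h2 : g y = t2 := by simpa using (List.mem_filter.mp hy).2
      simpa [h1, h2] using ht

-- ===== VERDICT (by name: the statement is the Claim_ definition above) =====
theorem getFinalOrder_spec : Claim_equal_getFinalOrder := by
  intro k amount _ _
  unfold Spec_getFinalOrder
  exact getFinalOrder_eq k amount
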